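-- pv_equiv track=rewrite | github.com/Liv66/25SummerStudy | KNY/KNY_constraint.py | is_route_feasible
-- ===== SOURCE A (Python) =====
-- from typing import List
--
-- def is_route_feasible(
--     route: List[int],
--     node_types: List[int],
--     demands: List[int],
--     capa: int,
--     depot_idx: int,
-- ) -> bool:
--     if route[0] != depot_idx or route[-1] != depot_idx:
--         return False
--
--     # 배송 먼저, 회수는 뒤에
--     seen_pick = False
--     for n in route[1:-1]:
--         if node_types[n] == 0:
--             seen_pick = True
--         elif seen_pick:
--             return False  # 회수 뒤에 배송 → 제약 위반
--
--     # ✅ 적재 시뮬레이션: 배송량 누적, 회수 시작 시 초기화 후 회수 누적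
--     load = 0
--     in_pickup = False
--     for n in route[1:-1]:
--         if node_types[n] == 1:  # 배송
--             if in_pickup:
--                 return False  # pickup 이후 배송 → 제약 위반
--             load += demands[n]
--             if load > capa:
--                 return False
--         else:  # 회수
--             if not in_pickup:
--                 in_pickup = True
--                 load = 0  # 회수 시작 시 적재 초기화
--             load += demands[n]
--             if load > capa:
--                 return False
--
--     # 최소 1개의 배송 노드는 포함해야 함
--     if not any(node_types[n] == 1 for n in route if n != depot_idx):
--         return False
--
--     return True
-- ===== SOURCE B (Python) =====
-- from typing import List
--
-- def _fits(nodes: List[int], demands: List[int], capa: int) -> bool: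
--     load = 0
--     for n in nodes:
--         load += demands[n]
--         if load > capa:
--             return False
--     return True
--
-- def is_route_feasible(
--     route: List[int],
--     node_types: List[int],
--     demands: List[int],
--     capa: int,
--     depot_idx: int,
-- ) -> bool:
--     if route[0] != depot_idx or route[-1] != depot_idx:
--         return False
--     inter = route[1:-1]
--     # one lazy scan of the interior: collect the node types, reject anything that
--     # follows the first pickup (type 0) node unless it is a pickup too
--     types: List[int] = []
--     pickup_seen = False
--     for n in inter:
--         t = node_types[n]
--         if t == 0:
--             pickup_seen = True
--         elif pickup_seen:
--             return False
--         types.append(t)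
--     # split the interior at the end of its all-deliveries prefix; no delivery may
--     # appear in the tail
--     j = next((k for k, t in enumerate(types) if t != 1), len(types))
--     if 1 in types[j:]:
--         return False
--     # at least one non-depot delivery node
--     if not any(t == 1 for n, t in zip(inter, types) if n != depot_idx):
--         return False
--     # each phase starts from an empty load and must stay within capacity
--     return _fits(inter[:j], demands, capa) and _fits(inter[j:], demands, capa)
-- ===== Notes on version B (the rewrite author's own statement) =====
-- stated objective: alternative
-- what changed: A makes three separate stateful passes (a seen_pick ordering loop, a load simulation with an in_pickup flag that resets the load, then a final any-scan over the whole route); B makes one lazy scan that collects the interior node types while enforcing the ordering, then splits the interior declaratively at the end of its all-deliveries prefix and reduces the rest to a no-delivery-in-tail membership test, a zip-based delivery-existence test, and two independent running-capacity checks on the prefix and tail slices.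
-- outside the precondition, e.g. on is_route_feasible([1, 0, 0, 1, 5, 1], [0, 1, 1, 0, 1], [5, 0, -2, 4, 0], 5, 1): A returns False, B returns False
import Mathlib
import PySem

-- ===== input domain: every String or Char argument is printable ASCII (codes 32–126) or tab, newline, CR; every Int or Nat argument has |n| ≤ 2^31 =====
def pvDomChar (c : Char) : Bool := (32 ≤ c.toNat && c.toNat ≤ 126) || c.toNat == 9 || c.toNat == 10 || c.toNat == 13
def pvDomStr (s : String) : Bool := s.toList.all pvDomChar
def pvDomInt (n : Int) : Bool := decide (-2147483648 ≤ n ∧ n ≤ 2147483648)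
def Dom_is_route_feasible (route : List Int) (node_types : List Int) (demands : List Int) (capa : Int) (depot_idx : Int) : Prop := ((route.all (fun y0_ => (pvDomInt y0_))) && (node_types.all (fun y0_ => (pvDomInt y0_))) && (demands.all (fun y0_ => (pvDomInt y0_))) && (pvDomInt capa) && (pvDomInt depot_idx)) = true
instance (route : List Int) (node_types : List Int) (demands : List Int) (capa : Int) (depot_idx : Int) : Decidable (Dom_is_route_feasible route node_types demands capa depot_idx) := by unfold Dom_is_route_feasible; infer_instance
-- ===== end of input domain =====

-- B replaces A's three stateful flag-driven passes by one lazy type-collecting ordering scan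
-- plus a declarative split of the interior at the end of its all-deliveries prefix
-- ('alternative', same cost).

-- ===== PORT A =====
-- Each Python loop with early `return` becomes a recursive helper: `some b` = `return b`,
-- `none` = the loop fell through.
def aLoop1 (node_types : List Int) (seen : Bool) : List Int → Option Bool
  | [] => none
  | n :: rest =>
    if PySem.List.pyGetD node_types n 0 = 0 then aLoop1 node_types true rest
    else if seen then some false
    else aLoop1 node_types seen rest

def aLoop2 (node_types : List Int) (demands : List Int) (capa : Int) (load : Int) (inp : Bool) : List Int → Option Bool
  | [] => none
  | n :: rest =>
    if PySem.List.pyGetD node_types n 0 = 1 then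
      if inp then some false
      else
        if load + PySem.List.pyGetD demands n 0 > capa then some false
        else aLoop2 node_types demands capa (load + PySem.List.pyGetD demands n 0) inp rest
    else
      if (if inp then load else 0) + PySem.List.pyGetD demands n 0 > capa then some false
      else aLoop2 node_types demands capa ((if inp then load else 0) + PySem.List.pyGetD demands n 0) true rest

def is_route_feasible (route : List Int) (node_types : List Int) (demands : List Int) (capa : Int) (depot_idx : Int) : Bool :=
  if PySem.List.pyGetD route 0 0 ≠ depot_idx ∨ PySem.List.pyGetD route (-1) 0 ≠ depot_idx then false
  else
    match aLoop1 node_types false (PySem.List.slice route (some 1) (some (-1))) with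
    | some b => b
    | none =>
      match aLoop2 node_types demands capa 0 false (PySem.List.slice route (some 1) (some (-1))) with
      | some b => b
      | none =>
        if ¬ (route.any fun n => decide (n ≠ depot_idx) && decide (PySem.List.pyGetD node_types n 0 = 1)) then false
        else true

-- ===== PORT B =====
-- B's single type-collecting scan: `none` = the `return False` on a delivery after a pickup,
-- `some types` = the collected interior node types.
def bScan (node_types : List Int) (pick : Bool) : List Int → Option (List Int)
  | [] => some []
  | n :: rest =>
    if PySem.List.pyGetD node_types n 0 = 0 then
      (bScan node_types true rest).map (PySem.List.pyGetD node_types n 0 :: ·)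
    else if pick then none
    else (bScan node_types pick rest).map (PySem.List.pyGetD node_types n 0 :: ·)

def bFits (demands : List Int) (capa : Int) (load : Int) : List Int → Bool
  | [] => true
  | n :: rest =>
    if load + PySem.List.pyGetD demands n 0 > capa then false
    else bFits demands capa (load + PySem.List.pyGetD demands n 0) rest

def is_route_feasible_alt (route : List Int) (node_types : List Int) (demands : List Int) (capa : Int) (depot_idx : Int) : Bool :=
  if PySem.List.pyGetD route 0 0 ≠ depot_idx ∨ PySem.List.pyGetD route (-1) 0 ≠ depot_idx then false
  else
    let inter := PySem.List.slice route (some 1) (some (-1))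
    match bScan node_types false inter with
    | none => false
    | some types =>
      let j := types.findIdx fun t => t != 1
      if (types.drop j).contains 1 then false
      else if !((inter.zip types).any fun p => decide (p.1 ≠ depot_idx) && decide (p.2 = 1)) then false
      else bFits demands capa 0 (inter.take j) && bFits demands capa 0 (inter.drop j)

-- ===== PRECONDITION & SPEC =====
-- Pre_ excludes exactly where either Python raises IndexError: the empty route, and — once the
-- depot endpoint guard passes — interior node indices out of range for node_types or demands.
-- It is stated per-index, so it is slightly conservative: it also excludes some inputs whose
-- out-of-range index sits after an early `return False` and is never touched; on those both
-- programs return the same False (see the claim's cites).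
def Pre_is_route_feasible (route : List Int) (node_types : List Int) (demands : List Int) (capa : Int) (depot_idx : Int) : Prop :=
  route ≠ [] ∧
  ((route.head? = some depot_idx ∧ route.getLast? = some depot_idx) →
    ∀ n ∈ (route.drop 1).dropLast,
      PySem.Raise.InRange node_types.length n ∧ PySem.Raise.InRange demands.length n)
instance (route : List Int) (node_types : List Int) (demands : List Int) (capa : Int) (depot_idx : Int) : Decidable (Pre_is_route_feasible route node_types demands capa depot_idx) := by unfold Pre_is_route_feasible; infer_instance

def pvWitness_is_route_feasible : List Int × List Int × List Int × Int × Int := ([0, 1, 0], [0, 1], [2, 3], 5, 0)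

def Spec_is_route_feasible (route : List Int) (node_types : List Int) (demands : List Int) (capa : Int) (depot_idx : Int) (out : Bool) : Prop := out = is_route_feasible_alt route node_types demands capa depot_idx
instance (route : List Int) (node_types : List Int) (demands : List Int) (capa : Int) (depot_idx : Int) (out : Bool) : Decidable (Spec_is_route_feasible route node_types demands capa depot_idx out) := by unfold Spec_is_route_feasible; infer_instance

-- ===== CLAIM (what is proved, stated in full; the proofs are below) =====
def Claim_equal_is_route_feasible : Prop := ∀ (route : List Int) (node_types : List Int) (demands : List Int) (capa : Int) (depot_idx : Int), Dom_is_route_feasible route node_types demands capa depot_idx → Pre_is_route_feasible route node_types demands capa depot_idx → Spec_is_route_feasible route node_types demands capa depot_idx (is_route_feasible route node_types demands capa depot_idx)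

-- ===== LEMMAS AND PROOFS =====

-- the first loop with seen_pick already True falls through iff every remaining type is 0
theorem aLoop1_true (node_types : List Int) (l : List Int) :
    aLoop1 node_types true l =
      if l.all (fun n => PySem.List.pyGetD node_types n 0 == 0) then none else some false := by
  induction l with
  | nil => simp [aLoop1]
  | cons n r ih =>
    by_cases h : PySem.List.pyGetD node_types n 0 = 0 <;> simp [aLoop1, h, ih]

theorem map_any_ne_zero (node_types : List Int) (r : List Int) :
    ((r.map fun n => PySem.List.pyGetD node_types n 0).any fun t => t != 0)
      = !(r.all fun n => PySem.List.pyGetD node_types n 0 == 0) := by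
  induction r with
  | nil => simp
  | cons m s ih =>
    simp only [List.map_cons, List.any_cons, List.all_cons, Bool.not_and, bne] at ih ⊢
    rw [ih]

-- the first loop, characterised by the split at the first pickup node
theorem aLoop1_false (node_types : List Int) (l : List Int) :
    aLoop1 node_types false l =
      if ((l.map fun n => PySem.List.pyGetD node_types n 0).drop
            ((l.map fun n => PySem.List.pyGetD node_types n 0).findIdx fun t => t == 0)).any
            (fun t => t != 0) then some false else none := by
  induction l with
  | nil => simp [aLoop1]
  | cons n r ih =>
    by_cases h : PySem.List.pyGetD node_types n 0 = 0
    · have e1 : aLoop1 node_types false (n :: r) = aLoop1 node_types true r := by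
        simp [aLoop1, h]
      have e2 : (((n :: r).map fun n => PySem.List.pyGetD node_types n 0).findIdx
          fun t => t == 0) = 0 := by
        simp [List.findIdx_cons, h]
      rw [e1, aLoop1_true, e2, List.drop_zero, List.map_cons, List.any_cons,
        map_any_ne_zero]
      have e3 : (PySem.List.pyGetD node_types n 0 != 0) = false := by simp [h]
      rw [e3, Bool.false_or]
      cases hall : (r.all fun n => PySem.List.pyGetD node_types n 0 == 0) <;> simp [hall]
    · have hb : ((PySem.List.pyGetD node_types n 0) == 0) = false := by
        simp [h]
      simp [aLoop1, h, hb, List.findIdx_cons, ih]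

-- B's scan with pickup_seen already True: succeeds iff every remaining type is 0
theorem bScan_true (node_types : List Int) (l : List Int) :
    bScan node_types true l =
      if l.all (fun n => PySem.List.pyGetD node_types n 0 == 0)
        then some (l.map fun n => PySem.List.pyGetD node_types n 0) else none := by
  induction l with
  | nil => simp [bScan]
  | cons n r ih =>
    by_cases h : PySem.List.pyGetD node_types n 0 = 0
    · rw [show bScan node_types true (n :: r)
          = (bScan node_types true r).map (PySem.List.pyGetD node_types n 0 :: ·) by
            simp [bScan, h], ih]
      cases hall : (r.all fun n => PySem.List.pyGetD node_types n 0 == 0) <;> simp [hall, h]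
    · simp [bScan, h]

-- B's scan succeeds on exactly the inputs on which A's first loop falls through,
-- and then returns the mapped types
theorem bScan_false (node_types : List Int) (l : List Int) :
    bScan node_types false l =
      if ((l.map fun n => PySem.List.pyGetD node_types n 0).drop
            ((l.map fun n => PySem.List.pyGetD node_types n 0).findIdx fun t => t == 0)).any
            (fun t => t != 0) then none
      else some (l.map fun n => PySem.List.pyGetD node_types n 0) := by
  induction l with
  | nil => simp [bScan]
  | cons n r ih =>
    by_cases h : PySem.List.pyGetD node_types n 0 = 0
    · have e1 : bScan node_types false (n :: r)
          = (bScan node_types true r).map (PySem.List.pyGetD node_types n 0 :: ·) := by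
        simp [bScan, h]
      have e2 : (((n :: r).map fun n => PySem.List.pyGetD node_types n 0).findIdx
          fun t => t == 0) = 0 := by
        simp [List.findIdx_cons, h]
      rw [e1, bScan_true, e2, List.drop_zero, List.map_cons, List.any_cons,
        map_any_ne_zero]
      have e3 : (PySem.List.pyGetD node_types n 0 != 0) = false := by simp [h]
      rw [e3, Bool.false_or]
      cases hall : (r.all fun n => PySem.List.pyGetD node_types n 0 == 0) <;> simp [hall]
    · have hb : ((PySem.List.pyGetD node_types n 0) == 0) = false := by
        simp [h]
      rw [show bScan node_types false (n :: r)
          = (bScan node_types false r).map (PySem.List.pyGetD node_types n 0 :: ·) by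
            simp [bScan, h], ih]
      simp [List.findIdx_cons, hb]
      split <;> simp

-- the load loop in the pickup phase: an early False iff a delivery appears or capacity breaks
theorem aLoop2_pickup (node_types : List Int) (demands : List Int) (capa : Int)
    (l : List Int) (load : Int) :
    aLoop2 node_types demands capa load true l =
      if (l.map fun n => PySem.List.pyGetD node_types n 0).contains 1
          || !(bFits demands capa load l) then some false else none := by
  induction l generalizing load with
  | nil => simp [aLoop2, bFits]
  | cons n r ih =>
    by_cases h : PySem.List.pyGetD node_types n 0 = 1
    · simp [aLoop2, h, bFits, List.contains_cons]
    · by_cases hc : load + PySem.List.pyGetD demands n 0 > capa <;>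
        simp [aLoop2, h, Ne.symm h, hc, bFits, List.contains_cons, ih]

-- the load loop in the delivery phase: B's split at the end of the all-deliveries prefix
theorem aLoop2_delivery (node_types : List Int) (demands : List Int) (capa : Int)
    (l : List Int) (load : Int) :
    aLoop2 node_types demands capa load false l =
      (if !(bFits demands capa load
              (l.take ((l.map fun n => PySem.List.pyGetD node_types n 0).findIdx fun t => t != 1)))
        then some false
        else aLoop2 node_types demands capa 0 true
              (l.drop ((l.map fun n => PySem.List.pyGetD node_types n 0).findIdx fun t => t != 1))) := by
  induction l generalizing load with
  | nil => simp [aLoop2, bFits]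
  | cons n r ih =>
    by_cases h : PySem.List.pyGetD node_types n 0 = 1
    · have hb : ((PySem.List.pyGetD node_types n 0) != 1) = false := by simp [h]
      by_cases hc : load + PySem.List.pyGetD demands n 0 > capa <;>
        simp [aLoop2, h, hb, hc, bFits, List.findIdx_cons, ih]
    · have hb : ((PySem.List.pyGetD node_types n 0) != 1) = true := by simp [h]
      simp [aLoop2, h, hb, bFits, List.findIdx_cons]

-- B's final any over (inter.zip types) is the any over inter
theorem zip_map_any (node_types : List Int) (depot_idx : Int) (l : List Int) :
    ((l.zip (l.map fun n => PySem.List.pyGetD node_types n 0)).any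
        fun p => decide (p.1 ≠ depot_idx) && decide (p.2 = 1))
      = l.any fun n => decide (n ≠ depot_idx) && decide (PySem.List.pyGetD node_types n 0 = 1) := by
  induction l with
  | nil => rfl
  | cons m s ih => simp only [List.map_cons, List.zip_cons_cons, List.any_cons, ih]

-- Python's xs[1:-1] is drop 1 then dropLast
theorem slice_one_neg_one (xs : List Int) :
    PySem.List.slice xs (some 1) (some (-1)) = (xs.drop 1).dropLast := by
  have h1 : PySem.List.slice xs (some 1) (some (-1))
      = (xs.drop (PySem.List.clampIdx xs.length 1)).take
          (PySem.List.clampIdx xs.length (-1) - PySem.List.clampIdx xs.length 1) := rfl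
  rw [h1, PySem.List.clampIdx_neg_one]
  cases xs with
  | nil => simp
  | cons a r =>
    have hc : PySem.List.clampIdx (a :: r).length 1 = 1 := by
      have := PySem.List.clampIdx_natCast (n := (a :: r).length) (k := 1)
      simpa using this
    rw [hc]
    simp [List.dropLast_eq_take]

-- with both endpoints equal to the depot, the final any-scan over the route
-- is the any-scan over the interior, for a predicate false at the depot
theorem any_route_interior (p : Int → Bool) (route : List Int) (depot_idx : Int)
    (hp : p depot_idx = false)
    (h0 : PySem.List.pyGetD route 0 0 = depot_idx)
    (h1 : PySem.List.pyGetD route (-1) 0 = depot_idx) :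
    route.any p = ((route.drop 1).dropLast).any p := by
  cases route with
  | nil => simp
  | cons a r =>
    have ha : a = depot_idx := by
      simpa [PySem.List.pyGetD_zero_cons] using h0
    cases hr : r with
    | nil => simp [ha, hp]
    | cons b s =>
      have hne : r ≠ [] := by simp [hr]
      have hlast : r.getLast hne = depot_idx := by
        have h1' : PySem.List.pyGetD (a :: r) (-1) 0
            = (a :: r).getLast (List.cons_ne_nil a r) := by
          simp [PySem.List.pyGetD_neg_one]
        rw [h1'] at h1
        rw [List.getLast_cons hne] at h1
        exact h1
      have hsplit : r.dropLast ++ [r.getLast hne] = r := List.dropLast_append_getLast hne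
      subst hr
      calc (a :: b :: s).any p = (b :: s).any p := by simp [ha, hp]
        _ = ((b :: s).dropLast ++ [(b :: s).getLast hne]).any p := by rw [hsplit]
        _ = ((b :: s).dropLast).any p := by
              simp [List.any_append, hlast, hp]

-- ===== VERDICT (by name: the statement is the Claim_ definition above) =====
theorem is_route_feasible_spec : Claim_equal_is_route_feasible := by
  intro route node_types demands capa depot_idx _ _
  unfold Spec_is_route_feasible
  unfold is_route_feasible is_route_feasible_alt
  simp only [Int.reduceNeg]
  by_cases hg : PySem.List.pyGetD route 0 0 ≠ depot_idx ∨ PySem.List.pyGetD route (-1) 0 ≠ depot_idx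
  · simp [hg]
  · rw [not_or, not_not, not_not] at hg
    obtain ⟨h0, h1⟩ := hg
    rw [if_neg (by simp [h0, h1] :
          ¬(PySem.List.pyGetD route 0 0 ≠ depot_idx ∨
            PySem.List.pyGetD route (-1) 0 ≠ depot_idx)),
        if_neg (by simp [h0, h1] :
          ¬(PySem.List.pyGetD route 0 0 ≠ depot_idx ∨
            PySem.List.pyGetD route (-1) 0 ≠ depot_idx))]
    rw [aLoop1_false, bScan_false, aLoop2_delivery, aLoop2_pickup]
    rw [List.map_drop]
    cases hC1 : ((PySem.List.slice route (some 1) (some (-1))).map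
        (fun n => PySem.List.pyGetD node_types n 0)).drop
        (((PySem.List.slice route (some 1) (some (-1))).map
          (fun n => PySem.List.pyGetD node_types n 0)).findIdx fun t => t == 0)
        |>.any (fun t => t != 0) with
    | true => simp
    | false =>
      simp only [Bool.false_eq_true, if_false]
      cases hFt : bFits demands capa 0 ((PySem.List.slice route (some 1) (some (-1))).take
          (((PySem.List.slice route (some 1) (some (-1))).map
            (fun n => PySem.List.pyGetD node_types n 0)).findIdx fun t => t != 1)) with
      | false =>
        cases hCt : (((PySem.List.slice route (some 1) (some (-1))).map
            (fun n => PySem.List.pyGetD node_types n 0)).drop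
            (((PySem.List.slice route (some 1) (some (-1))).map
              (fun n => PySem.List.pyGetD node_types n 0)).findIdx fun t => t != 1)).contains 1 with
        | true => simp [hFt, hCt]
        | false =>
          cases hA : ((PySem.List.slice route (some 1) (some (-1))).zip
              ((PySem.List.slice route (some 1) (some (-1))).map
                (fun n => PySem.List.pyGetD node_types n 0))).any
              (fun p => decide (p.1 ≠ depot_idx) && decide (p.2 = 1)) with
          | false => simp [hFt, hCt, hA]
          | true => simp [hFt, hCt, hA]
      | true =>
        cases hCt : (((PySem.List.slice route (some 1) (some (-1))).map
            (fun n => PySem.List.pyGetD node_types n 0)).drop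
            (((PySem.List.slice route (some 1) (some (-1))).map
              (fun n => PySem.List.pyGetD node_types n 0)).findIdx fun t => t != 1)).contains 1 with
        | true => simp [hFt, hCt]
        | false =>
          cases hFd : bFits demands capa 0 ((PySem.List.slice route (some 1) (some (-1))).drop
              (((PySem.List.slice route (some 1) (some (-1))).map
                (fun n => PySem.List.pyGetD node_types n 0)).findIdx fun t => t != 1)) with
          | false =>
            cases hA : ((PySem.List.slice route (some 1) (some (-1))).zip
                ((PySem.List.slice route (some 1) (some (-1))).map
                  (fun n => PySem.List.pyGetD node_types n 0))).any
                (fun p => decide (p.1 ≠ depot_idx) && decide (p.2 = 1)) with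
            | false => simp [hFt, hCt, hFd, hA]
            | true => simp [hFt, hCt, hFd, hA]
          | true =>
            trans (route.any fun n => decide (n ≠ depot_idx) &&
                decide (PySem.List.pyGetD node_types n 0 = 1))
            · cases hA : route.any (fun n => decide (n ≠ depot_idx) &&
                  decide (PySem.List.pyGetD node_types n 0 = 1)) <;> simp [hFt, hCt, hFd, hA]
            · rw [any_route_interior (fun n => decide (n ≠ depot_idx) &&
                  decide (PySem.List.pyGetD node_types n 0 = 1)) route depot_idx (by simp) h0 h1,
                ← slice_one_neg_one, ← zip_map_any node_types depot_idx]
              simp [hFt, hCt, hFd]
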